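-- pv_equiv track=rewrite | github.com/OpenReasoning/TruthTrees | Forseti/parser.py | get_main_symbol
-- ===== SOURCE A (Python) =====
-- SYMBOLS = ["&", "|", ">", "<", "-"]
--
-- REPLACES = [["and", "&"], ["or", "|"], ["implies", ">"], ["iff", "<"],
--             ["not", "-"]]
--
-- def clean_formula(formula):
--     """
--     Clean a given formula into a format we can use easily parse/use
--     :param formula: A valid formal logic formula
--     :return: A machine readable formula for parsing
--     """
--     formula = formula.replace(" ", "")
--     for replace in REPLACES:
--         formula = formula.replace(replace[0], replace[1])
--     return formula
--
-- def get_main_symbol(formula):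
--     """
--     Gets the primary symbol of a given formula
--     :param formula: a formal logic formula
--     :return: the main symbol in the formula (the most important
--              outermost symbol)
--     """
--     formula = clean_formula(formula)
--     symbol = ""
--     symbol_para = 0
--     current_para = 0
--     for char in formula:
--         if char == " ":
--             continue
--         elif char == "(":
--             current_para += 1
--         elif char == ")":
--             current_para -= 1
--         elif char in ["&", "|", ">", "<", "-"]:
--             if symbol == "":
--                 symbol = char
--                 symbol_para = current_para
--             elif current_para < symbol_para:
--                 symbol = char
--                 symbol_para = current_para
--             elif current_para == symbol_para:
--                 found_i = SYMBOLS.index(symbol)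
--                 new_i = SYMBOLS.index(char)
--                 if new_i < found_i:
--                     symbol = char
--                     symbol_para = current_para
--             else:
--                 # found symbol is higher than current
--                 pass
--         else:
--             # Just a symbol
--             pass
--     return symbol
-- ===== SOURCE B (Python) =====
-- SYMBOLS = ["&", "|", ">", "<", "-"]
--
-- REPLACES = [["and", "&"], ["or", "|"], ["implies", ">"], ["iff", "<"],
--             ["not", "-"]]
--
-- def clean_formula(formula):
--     formula = formula.replace(" ", "")
--     for replace in REPLACES:
--         formula = formula.replace(replace[0], replace[1])
--     return formula
--
-- def _min_depth(formula, symbol):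
--     """Minimum paren depth at which `symbol` occurs in `formula`, or None."""
--     depth = 0
--     best = None
--     for char in formula:
--         if char == "(":
--             depth += 1
--         elif char == ")":
--             depth -= 1
--         elif char == symbol and (best is None or depth < best):
--             best = depth
--     return best
--
-- def get_main_symbol(formula):
--     formula = clean_formula(formula)
--     depths = [_min_depth(formula, s) for s in SYMBOLS]
--     found = [d for d in depths if d is not None]
--     if not found:
--         return ""
--     m = min(found)
--     return SYMBOLS[depths.index(m)]
-- ===== Notes on version B (the rewrite author's own statement) =====
-- stated objective: alternative
-- what changed: B replaces A's single scan with a cross-symbol running best (branch ladder over depth/priority/ties) by staged passes: one independent minimum-paren-depth scan per connective symbol, then selection by min over the per-symbol depths and first index in priority order.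
import Mathlib
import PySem

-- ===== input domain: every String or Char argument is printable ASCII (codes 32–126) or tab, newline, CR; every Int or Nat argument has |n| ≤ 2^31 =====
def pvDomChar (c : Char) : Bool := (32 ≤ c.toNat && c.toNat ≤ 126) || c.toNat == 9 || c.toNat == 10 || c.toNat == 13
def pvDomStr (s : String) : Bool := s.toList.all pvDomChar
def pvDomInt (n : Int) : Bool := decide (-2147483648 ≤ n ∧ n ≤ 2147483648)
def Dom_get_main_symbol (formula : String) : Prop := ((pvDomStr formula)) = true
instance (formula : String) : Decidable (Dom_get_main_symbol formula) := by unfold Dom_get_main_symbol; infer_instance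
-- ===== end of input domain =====

-- B replaces A's single scan with a cross-symbol running best by staged passes: one independent
-- minimum-paren-depth scan per connective, then selection by min over depths and first index in
-- priority order (objective: alternative).
-- Python one-character strings (the iterated chars and the entries of SYMBOLS) are ported as Char;
-- A's "" sentinel for 'no symbol yet' is ported as Option Char (none = "").

-- shared module-level helpers (same in Source A and Source B)
def SYMBOLS : List Char := ['&', '|', '>', '<', '-']

def REPLACES : List (String × String) :=
  [("and", "&"), ("or", "|"), ("implies", ">"), ("iff", "<"), ("not", "-")]

def clean_formula (formula : String) : String :=
  REPLACES.foldl (fun f r => PySem.Str.replace f r.1 r.2) (PySem.Str.replace formula " " "")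

-- SYMBOLS.index(c); every looked-up char is a member of SYMBOLS, so the default is never used
def gmsIdx (c : Char) : Nat := (PySem.List.index? SYMBOLS c).getD 0

-- ===== PORT A =====
def gmsLoopA : List Char → Option Char → Int → Int → Option Char
  | [], symbol, _, _ => symbol
  | c :: rest, symbol, sp, cp =>
    if c = ' ' then gmsLoopA rest symbol sp cp
    else if c = '(' then gmsLoopA rest symbol sp (cp + 1)
    else if c = ')' then gmsLoopA rest symbol sp (cp - 1)
    else if c ∈ SYMBOLS then
      match symbol with
      | none => gmsLoopA rest (some c) cp cp
      | some s =>
        if cp < sp then gmsLoopA rest (some c) cp cp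
        else if cp = sp then
          if gmsIdx c < gmsIdx s then gmsLoopA rest (some c) cp cp
          else gmsLoopA rest (some s) sp cp
        else gmsLoopA rest (some s) sp cp
    else gmsLoopA rest symbol sp cp

def get_main_symbol (formula : String) : String :=
  match gmsLoopA (clean_formula formula).toList none 0 0 with
  | none => ""
  | some c => String.ofList [c]

-- ===== PORT B =====
-- _min_depth(formula, symbol): minimum paren depth at which `symbol` occurs, None if absent
def minDepthLoop (symbol : Char) : List Char → Int → Option Int → Option Int
  | [], _, best => best
  | c :: rest, depth, best =>
    if c = '(' then minDepthLoop symbol rest (depth + 1) best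
    else if c = ')' then minDepthLoop symbol rest (depth - 1) best
    else if c = symbol then
      -- `char == symbol and (best is None or depth < best)`
      match best with
      | none => minDepthLoop symbol rest depth (some depth)
      | some b =>
        if depth < b then minDepthLoop symbol rest depth (some depth)
        else minDepthLoop symbol rest depth best
    else minDepthLoop symbol rest depth best

-- selection tail of B: `found = [d for d in depths if d is not None]; if not found: return "";
-- m = min(found); return SYMBOLS[depths.index(m)]`.  The inner `none` branch is unreachable
-- (m always comes from an entry of depths) and SYMBOLS[i] always has i < 5, so getD is exact.
def gmsSelect (depths : List (Option Int)) : String :=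
  match PySem.List.min? (depths.filterMap id) (fun d => d) with
  | none => ""
  | some m =>
    match PySem.List.index? depths (some m) with
    | none => ""
    | some i => String.ofList [SYMBOLS.getD i ' ']

def get_main_symbol_alt (formula : String) : String :=
  gmsSelect (SYMBOLS.map (fun s => minDepthLoop s (clean_formula formula).toList 0 none))

-- ===== PRECONDITION & SPEC =====
def Spec_get_main_symbol (formula : String) (out : String) : Prop := out = get_main_symbol_alt formula
instance (formula : String) (out : String) : Decidable (Spec_get_main_symbol formula out) := by unfold Spec_get_main_symbol; infer_instance

-- ===== CLAIM (what is proved, stated in full; the proofs are below) =====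
def Claim_equal_get_main_symbol : Prop := ∀ (formula : String), Dom_get_main_symbol formula → Spec_get_main_symbol formula (get_main_symbol formula)

-- ===== LEMMAS AND PROOFS =====

def gmsInv (Bf : Char → Option Int) : Option Char → Int → Prop
  | none, _ => ∀ s ∈ SYMBOLS, Bf s = none
  | some c0, sp => c0 ∈ SYMBOLS ∧ Bf c0 = some sp ∧
      (∀ s ∈ SYMBOLS, ∀ v, Bf s = some v → sp ≤ v) ∧
      (∀ s ∈ SYMBOLS, gmsIdx s < gmsIdx c0 → ∀ v, Bf s = some v → sp < v)

theorem gms_min_id_eq {l : List Int} {m : Int} (h1 : m ∈ l) (h2 : ∀ y ∈ l, m ≤ y) :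
    PySem.List.min? l (fun x => x) = some m := by
  rcases hx : PySem.List.min? l (fun x => x) with _ | x
  · rw [PySem.List.min?_eq_none_iff] at hx; subst hx; cases h1
  · have hmem := PySem.List.min?_mem hx
    have hmin := PySem.List.min?_isMin hx m h1
    have hmx := h2 x hmem
    simp only [] at hmin
    rw [le_antisymm hmin hmx]

theorem mdl_skip {c s : Char} (rest : List Char) (d : Int) (b : Option Int)
    (h1 : c ≠ '(') (h2 : c ≠ ')') (h3 : c ≠ s) :
    minDepthLoop s (c :: rest) d b = minDepthLoop s rest d b := by
  simp [minDepthLoop, h1, h2, h3]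

theorem mdl_hit {c : Char} (rest : List Char) (d : Int) (b : Option Int)
    (h1 : c ≠ '(') (h2 : c ≠ ')') :
    minDepthLoop c (c :: rest) d b
      = minDepthLoop c rest d (some (match b with | none => d | some x => if d < x then d else x)) := by
  rcases b with _ | x
  · simp [minDepthLoop, h1, h2]
  · by_cases hd : d < x <;> simp [minDepthLoop, h1, h2, hd]

theorem gms_select_of_inv (Bf : Char → Option Int) (symbol : Option Char) (sp : Int)
    (h : gmsInv Bf symbol sp) :
    gmsSelect (SYMBOLS.map Bf) = (match symbol with | none => "" | some c => String.ofList [c]) := by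
  cases symbol with
  | none =>
    have h0 := h '&' (by decide); have h1 := h '|' (by decide); have h2 := h '>' (by decide)
    have h3 := h '<' (by decide); have h4 := h '-' (by decide)
    simp [gmsSelect, SYMBOLS, h0, h1, h2, h3, h4, PySem.List.min?]
  | some c0 =>
    obtain ⟨hc0, hv, hlb, hstrict⟩ := h
    have hmin : PySem.List.min? ((SYMBOLS.map Bf).filterMap id) (fun d => d) = some sp := by
      refine gms_min_id_eq (List.mem_filterMap.2 ⟨some sp, List.mem_map.2 ⟨c0, hc0, hv⟩, rfl⟩) ?_
      intro y hy
      rcases List.mem_filterMap.1 hy with ⟨o, ho, hid⟩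
      rcases List.mem_map.1 ho with ⟨s, hs, rfl⟩
      exact hlb s hs y (by simpa using hid)
    have hne : ∀ s ∈ SYMBOLS, gmsIdx s < gmsIdx c0 → Bf s ≠ some sp := by
      intro s hs hi he
      exact absurd (hstrict s hs hi sp he) (lt_irrefl sp)
    simp only [gmsSelect, hmin]
    fin_cases hc0
    · -- '&'
      rw [show SYMBOLS.map Bf = [Bf '&', Bf '|', Bf '>', Bf '<', Bf '-'] from rfl,
          hv, PySem.List.index?_cons_self]
      rfl
    · -- '|'
      rw [show SYMBOLS.map Bf = [Bf '&', Bf '|', Bf '>', Bf '<', Bf '-'] from rfl, hv,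
          PySem.List.index?_cons_of_ne _ (hne '&' (by decide) (by decide)),
          PySem.List.index?_cons_self]
      rfl
    · rw [show SYMBOLS.map Bf = [Bf '&', Bf '|', Bf '>', Bf '<', Bf '-'] from rfl, hv,
          PySem.List.index?_cons_of_ne _ (hne '&' (by decide) (by decide)),
          PySem.List.index?_cons_of_ne _ (hne '|' (by decide) (by decide)),
          PySem.List.index?_cons_self]
      rfl
    · rw [show SYMBOLS.map Bf = [Bf '&', Bf '|', Bf '>', Bf '<', Bf '-'] from rfl, hv,
          PySem.List.index?_cons_of_ne _ (hne '&' (by decide) (by decide)),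
          PySem.List.index?_cons_of_ne _ (hne '|' (by decide) (by decide)),
          PySem.List.index?_cons_of_ne _ (hne '>' (by decide) (by decide)),
          PySem.List.index?_cons_self]
      rfl
    · rw [show SYMBOLS.map Bf = [Bf '&', Bf '|', Bf '>', Bf '<', Bf '-'] from rfl, hv,
          PySem.List.index?_cons_of_ne _ (hne '&' (by decide) (by decide)),
          PySem.List.index?_cons_of_ne _ (hne '|' (by decide) (by decide)),
          PySem.List.index?_cons_of_ne _ (hne '>' (by decide) (by decide)),
          PySem.List.index?_cons_of_ne _ (hne '<' (by decide) (by decide)),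
          PySem.List.index?_cons_self]
      rfl


theorem gms_main (chars : List Char) : ∀ (cp : Int) (Bf : Char → Option Int)
    (symbol : Option Char) (sp : Int), gmsInv Bf symbol sp →
    gmsSelect (SYMBOLS.map (fun s => minDepthLoop s chars cp (Bf s)))
      = (match gmsLoopA chars symbol sp cp with | none => "" | some c => String.ofList [c]) := by
  induction chars with
  | nil =>
    intro cp Bf symbol sp h
    simp only [minDepthLoop, gmsLoopA]
    cases symbol <;> simpa using gms_select_of_inv Bf _ sp h
  | cons c rest ih =>
    intro cp Bf symbol sp h
    by_cases hop : c = '('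
    · subst hop
      rw [List.map_congr_left (fun s _ => by simp [minDepthLoop] :
            ∀ s ∈ SYMBOLS, minDepthLoop s ('(' :: rest) cp (Bf s) = minDepthLoop s rest (cp+1) (Bf s))]
      simp only [gmsLoopA]
      norm_num
      exact ih (cp+1) Bf symbol sp h
    · by_cases hcl : c = ')'
      · subst hcl
        rw [List.map_congr_left (fun s _ => by simp [minDepthLoop] :
              ∀ s ∈ SYMBOLS, minDepthLoop s (')' :: rest) cp (Bf s) = minDepthLoop s rest (cp-1) (Bf s))]
        simp only [gmsLoopA]
        norm_num
        exact ih (cp-1) Bf symbol sp h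
      · by_cases hmem : c ∈ SYMBOLS
        · -- connective character
          have hsp : c ≠ ' ' := by intro hh; subst hh; revert hmem; decide
          set newb : Option Int :=
            some (match Bf c with | none => cp | some x => if cp < x then cp else x) with hnewb
          -- the new per-symbol table is Function.update Bf c newb
          have hmap : SYMBOLS.map (fun s => minDepthLoop s (c :: rest) cp (Bf s))
              = SYMBOLS.map (fun s => minDepthLoop s rest cp (Function.update Bf c newb s)) := by
            refine List.map_congr_left (fun s hs => ?_)
            by_cases hsc : s = c
            · rw [hsc, mdl_hit rest cp (Bf c) hop hcl, Function.update_self, hnewb]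
            · rw [mdl_skip rest cp (Bf s) hop hcl (fun hh => hsc hh.symm),
                  Function.update_of_ne hsc]
          -- characterize the updated entry for c: its value w is min(cp, old)
          obtain ⟨w, hwdef, hwle, hwmin, hwor⟩ :
              ∃ w, newb = some w ∧ w ≤ cp ∧ (∀ x, Bf c = some x → w ≤ x)
                ∧ (w = cp ∨ Bf c = some w) := by
            rcases hb : Bf c with _ | x
            · refine ⟨cp, ?_, le_refl _, ?_, Or.inl rfl⟩
              · rw [hnewb, hb]
              · intro x hx; cases hx
            · by_cases hx : cp < x
              · refine ⟨cp, ?_, le_refl _, ?_, Or.inl rfl⟩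
                · rw [hnewb, hb]; simp [hx]
                · intro y hy; injection hy with hy; omega
              · refine ⟨x, ?_, by omega, ?_, Or.inr rfl⟩
                · rw [hnewb, hb]; simp [hx]
                · intro y hy; injection hy with hy; omega
          have hupc : Function.update Bf c newb c = some w := by
            rw [Function.update_self, hwdef]
          have hvcase : ∀ s, ∀ v : Int, Function.update Bf c newb s = some v →
              (s = c ∧ v = w) ∨ (s ≠ c ∧ Bf s = some v) := by
            intro s v hv
            by_cases hsc : s = c
            · rw [hsc, hupc] at hv
              exact Or.inl ⟨hsc, (Option.some.inj hv).symm⟩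
            · rw [Function.update_of_ne hsc] at hv
              exact Or.inr ⟨hsc, hv⟩
          rw [hmap]
          simp only [gmsLoopA, if_neg hsp, if_neg hop, if_neg hcl, if_pos hmem]
          rcases symbol with _ | s0
          · -- no symbol yet: every entry of Bf is none on SYMBOLS, so w = cp
            have hbn : Bf c = none := h c hmem
            have hwcp : w = cp := by
              rcases hwor with hh | hh
              · exact hh
              · rw [hbn] at hh; cases hh
            refine ih cp _ (some c) cp ⟨hmem, by rw [hupc, hwcp], ?_, ?_⟩
            · intro s hs v hv
              rcases hvcase s v hv with ⟨_, hh⟩ | ⟨_, hh⟩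
              · omega
              · rw [h s hs] at hh; cases hh
            · intro s hs hlt v hv
              rcases hvcase s v hv with ⟨hh, _⟩ | ⟨_, hh⟩
              · rw [hh] at hlt; omega
              · rw [h s hs] at hh; cases hh
          · obtain ⟨hs0mem, hs0v, hlb, hstrict⟩ := h
            by_cases hlt : cp < sp
            · -- strictly shallower: A takes c; w = cp since any old entry for c is ≥ sp > cp
              simp only [if_pos hlt]
              have hwcp : w = cp := by
                rcases hwor with hh | hh
                · exact hh
                · have := hlb c hmem w hh; omega
              refine ih cp _ (some c) cp ⟨hmem, by rw [hupc, hwcp], ?_, ?_⟩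
              · intro s hs v hv
                rcases hvcase s v hv with ⟨_, hh⟩ | ⟨_, hh⟩
                · omega
                · have := hlb s hs v hh; omega
              · intro s hs hlt2 v hv
                rcases hvcase s v hv with ⟨hh, _⟩ | ⟨_, hh⟩
                · rw [hh] at hlt2; omega
                · have := hlb s hs v hh; omega
            · simp only [if_neg hlt]
              by_cases heq : cp = sp
              · simp only [if_pos heq]
                by_cases hidx : gmsIdx c < gmsIdx s0
                · -- same depth, better priority: A takes c; old entry for c would be > sp
                  simp only [if_pos hidx]
                  have hwcp : w = cp := by
                    rcases hwor with hh | hh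
                    · exact hh
                    · have := hstrict c hmem hidx w hh; omega
                  refine ih cp _ (some c) cp ⟨hmem, by rw [hupc, hwcp], ?_, ?_⟩
                  · intro s hs v hv
                    rcases hvcase s v hv with ⟨_, hh⟩ | ⟨_, hh⟩
                    · omega
                    · have := hlb s hs v hh; omega
                  · intro s hs hlt2 v hv
                    rcases hvcase s v hv with ⟨hh, _⟩ | ⟨_, hh⟩
                    · rw [hh] at hlt2; omega
                    · have := hstrict s hs (by omega) v hh; omega
                · -- same depth, not better: A keeps s0
                  simp only [if_neg hidx]
                  have hbs0 : Function.update Bf c newb s0 = some sp := by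
                    by_cases hsc : s0 = c
                    · rw [hsc, hupc]
                      have hbc : Bf c = some sp := hsc ▸ hs0v
                      have h1 : w ≤ sp := hwmin sp hbc
                      have h2 : sp ≤ w := by
                        rcases hwor with hh | hh
                        · omega
                        · rw [hbc] at hh; injection hh with hh; omega
                      rw [show w = sp by omega]
                    · rw [Function.update_of_ne hsc, hs0v]
                  refine ih cp _ (some s0) sp ⟨hs0mem, hbs0, ?_, ?_⟩
                  · intro s hs v hv
                    rcases hvcase s v hv with ⟨_, hh⟩ | ⟨_, hh⟩
                    · have : sp ≤ w := by
                        rcases hwor with hh2 | hh2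
                        · omega
                        · exact hlb c hmem w hh2
                      omega
                    · exact hlb s hs v hh
                  · intro s hs hlt2 v hv
                    rcases hvcase s v hv with ⟨hh, _⟩ | ⟨_, hh⟩
                    · rw [hh] at hlt2; omega
                    · exact hstrict s hs hlt2 v hh
              · -- deeper: A keeps s0
                have hgt : sp < cp := by omega
                simp only [if_neg heq]
                have hbs0 : Function.update Bf c newb s0 = some sp := by
                  by_cases hsc : s0 = c
                  · rw [hsc, hupc]
                    have h1 : w ≤ sp := hwmin sp (hsc ▸ hs0v)
                    have h2 : sp ≤ w := by
                      rcases hwor with hh | hh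
                      · omega
                      · have := hlb c hmem w hh; omega
                    rw [show w = sp by omega]
                  · rw [Function.update_of_ne hsc, hs0v]
                refine ih cp _ (some s0) sp ⟨hs0mem, hbs0, ?_, ?_⟩
                · intro s hs v hv
                  rcases hvcase s v hv with ⟨_, hh⟩ | ⟨_, hh⟩
                  · have : sp ≤ w := by
                      rcases hwor with hh2 | hh2
                      · omega
                      · exact hlb c hmem w hh2
                    omega
                  · exact hlb s hs v hh
                · intro s hs hlt2 v hv
                  rcases hvcase s v hv with ⟨hheq, hh⟩ | ⟨_, hh⟩
                  · have : sp < w := by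
                      rcases hwor with hh2 | hh2
                      · omega
                      · exact hstrict c hmem (hheq ▸ hlt2) w hh2
                    omega
                  · exact hstrict s hs hlt2 v hh
        · -- ordinary character (incl. ' '): both sides skip
          have hmap : SYMBOLS.map (fun s => minDepthLoop s (c :: rest) cp (Bf s))
              = SYMBOLS.map (fun s => minDepthLoop s rest cp (Bf s)) := by
            refine List.map_congr_left (fun s hs => ?_)
            exact mdl_skip rest cp (Bf s) hop hcl (fun hh => hmem (hh ▸ hs))
          rw [hmap]
          by_cases hsp : c = ' '
          · simp only [gmsLoopA, if_pos hsp]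
            exact ih cp Bf symbol sp h
          · simp only [gmsLoopA, if_neg hsp, if_neg hop, if_neg hcl, if_neg hmem]
            exact ih cp Bf symbol sp h

-- ===== VERDICT (by name: the statement is the Claim_ definition above) =====
theorem get_main_symbol_spec : Claim_equal_get_main_symbol := by
  intro formula _
  unfold Spec_get_main_symbol get_main_symbol get_main_symbol_alt
  exact (gms_main (clean_formula formula).toList 0 (fun _ => none) none 0 (by intro s _; rfl)).symm
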